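-- pv_equiv track=rewrite | github.com/XxxGHOSTX/MNN | mnn/deterministic/rng.py | splitmix64_words
-- ===== SOURCE A (Python) =====
-- from typing import Dict, List
--
-- _MASK_64 = (1 << 64) - 1
--
-- def splitmix64_words(seed: int, stream_index: int, words: int) -> List[int]:
--     """Generate SplitMix64 words deterministically (cross-language compatible)."""
--     x = (seed ^ ((stream_index + 1) * 0x9E3779B97F4A7C15)) & _MASK_64
--     out: List[int] = []
--     for _ in range(words):
--         x = (x + 0x9E3779B97F4A7C15) & _MASK_64
--         z = x
--         z = (z ^ (z >> 30)) * 0xBF58476D1CE4E5B9 & _MASK_64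
--         z = (z ^ (z >> 27)) * 0x94D049BB133111EB & _MASK_64
--         z = z ^ (z >> 31)
--         out.append(z & _MASK_64)
--     return out
-- ===== SOURCE B (Python) =====
-- from typing import List
--
-- _MASK_64 = (1 << 64) - 1
-- _GAMMA = 0x9E3779B97F4A7C15
--
-- def splitmix64_words(seed: int, stream_index: int, words: int) -> List[int]:
--     """Staged-pipeline SplitMix64: materialize the counter values first, then
--     run each finalizer stage as its own full pass over the list (no
--     loop-carried state at all)."""
--     base = (seed ^ ((stream_index + 1) * _GAMMA)) & _MASK_64
--     xs = [(base + (i + 1) * _GAMMA) & _MASK_64 for i in range(words)]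
--     xs = [((z ^ (z >> 30)) * 0xBF58476D1CE4E5B9) & _MASK_64 for z in xs]
--     xs = [((z ^ (z >> 27)) * 0x94D049BB133111EB) & _MASK_64 for z in xs]
--     return [(z ^ (z >> 31)) & _MASK_64 for z in xs]
-- ===== Notes on version B (the rewrite author's own statement) =====
-- stated objective: alternative
-- what changed: A threads one loop-carried counter and finishes each word inside a single loop; B is a staged pipeline: it materializes the whole counter list in closed form (base+(i+1)*GAMMA mod 2^64, no accumulator), then applies each of the three finalizer stages as a separate full pass over the list.
import Mathlib
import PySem

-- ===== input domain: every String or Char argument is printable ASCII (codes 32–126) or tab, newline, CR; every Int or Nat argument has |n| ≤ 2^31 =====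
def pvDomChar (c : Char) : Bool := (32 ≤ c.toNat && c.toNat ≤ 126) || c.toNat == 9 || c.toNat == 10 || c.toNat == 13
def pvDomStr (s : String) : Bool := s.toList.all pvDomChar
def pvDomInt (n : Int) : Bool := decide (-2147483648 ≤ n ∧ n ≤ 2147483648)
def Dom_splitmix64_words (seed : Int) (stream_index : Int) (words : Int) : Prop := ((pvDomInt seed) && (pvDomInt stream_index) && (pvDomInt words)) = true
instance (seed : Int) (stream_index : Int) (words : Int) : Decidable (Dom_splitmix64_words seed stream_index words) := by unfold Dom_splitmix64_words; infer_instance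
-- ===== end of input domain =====

-- B replaces A's single loop with a loop-carried counter by a staged pipeline:
-- the counter list is materialized in closed form, then each finalizer stage is
-- a separate full pass over the list; alternative decomposition, same output.

-- ===== PORT A =====
-- the body of A's 'for _ in range(words)' loop, named so the fold can recurse over it
def pvLoopA (st : Int × List Int) (_ : Int) : Int × List Int :=
  let x := PySem.Int.band (st.1 + 0x9E3779B97F4A7C15) 0xFFFFFFFFFFFFFFFF
  let z := x
  let z := PySem.Int.band ((PySem.Int.bxor z (z >>> (30 : Nat))) * 0xBF58476D1CE4E5B9) 0xFFFFFFFFFFFFFFFF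
  let z := PySem.Int.band ((PySem.Int.bxor z (z >>> (27 : Nat))) * 0x94D049BB133111EB) 0xFFFFFFFFFFFFFFFF
  let z := PySem.Int.bxor z (z >>> (31 : Nat))
  (x, st.2 ++ [PySem.Int.band z 0xFFFFFFFFFFFFFFFF])

def splitmix64_words (seed : Int) (stream_index : Int) (words : Int) : List Int :=
  let x := PySem.Int.band (PySem.Int.bxor seed ((stream_index + 1) * 0x9E3779B97F4A7C15)) 0xFFFFFFFFFFFFFFFF
  ((PySem.List.pyRange 0 words 1).foldl pvLoopA (x, [])).2

-- ===== PORT B =====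
-- the three finalizer stages, each applied to the whole list in its own pass
def pvStage1 (z : Int) : Int :=
  PySem.Int.band ((PySem.Int.bxor z (z >>> (30 : Nat))) * 0xBF58476D1CE4E5B9) 0xFFFFFFFFFFFFFFFF
def pvStage2 (z : Int) : Int :=
  PySem.Int.band ((PySem.Int.bxor z (z >>> (27 : Nat))) * 0x94D049BB133111EB) 0xFFFFFFFFFFFFFFFF
def pvStage3 (z : Int) : Int :=
  PySem.Int.band (PySem.Int.bxor z (z >>> (31 : Nat))) 0xFFFFFFFFFFFFFFFF

def splitmix64_words_alt (seed : Int) (stream_index : Int) (words : Int) : List Int :=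
  let base := PySem.Int.band (PySem.Int.bxor seed ((stream_index + 1) * 0x9E3779B97F4A7C15)) 0xFFFFFFFFFFFFFFFF
  let xs := (PySem.List.pyRange 0 words 1).map (fun i => PySem.Int.band (base + (i + 1) * 0x9E3779B97F4A7C15) 0xFFFFFFFFFFFFFFFF)
  let xs := xs.map pvStage1
  let xs := xs.map pvStage2
  xs.map pvStage3

-- ===== PRECONDITION & SPEC =====
def Spec_splitmix64_words (seed : Int) (stream_index : Int) (words : Int) (out : List Int) : Prop := out = splitmix64_words_alt seed stream_index words
instance (seed : Int) (stream_index : Int) (words : Int) (out : List Int) : Decidable (Spec_splitmix64_words seed stream_index words out) := by unfold Spec_splitmix64_words; infer_instance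

-- ===== CLAIM (what is proved, stated in full; the proofs are below) =====
def Claim_equal_splitmix64_words : Prop := ∀ (seed : Int) (stream_index : Int) (words : Int), Dom_splitmix64_words seed stream_index words → Spec_splitmix64_words seed stream_index words (splitmix64_words seed stream_index words)

-- ===== LEMMAS AND PROOFS =====

-- the composed finalizer (proof-side name for the three stages in sequence)
def pvMix (z : Int) : Int := pvStage3 (pvStage2 (pvStage1 z))

-- B's staged passes fuse into one map of the composed finalizer over the counters
theorem pv_alt_fused (seed stream_index words : Int) :
    splitmix64_words_alt seed stream_index words
    = (PySem.List.pyRange 0 words 1).map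
        (fun i => pvMix (PySem.Int.band
          ((PySem.Int.band (PySem.Int.bxor seed ((stream_index + 1) * 0x9E3779B97F4A7C15)) 0xFFFFFFFFFFFFFFFF)
            + (i + 1) * 0x9E3779B97F4A7C15) 0xFFFFFFFFFFFFFFFF)) := by
  unfold splitmix64_words_alt
  simp [List.map_map, pvMix, Function.comp]

-- masking a nonnegative int with 2^64-1 is reduction mod 2^64
theorem pv_mask_emod (a : Int) (h : 0 ≤ a) :
    PySem.Int.band a 0xFFFFFFFFFFFFFFFF = a % 18446744073709551616 := by
  rw [PySem.Int.band_of_nonneg h (by norm_num)]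
  have h1 : a.toNat &&& (0xFFFFFFFFFFFFFFFF : Int).toNat = a.toNat % 2 ^ 64 := by
    have := Nat.and_two_pow_sub_one_eq_mod a.toNat 64
    norm_num at this ⊢
    exact this
  rw [h1]
  have h2 : ((a.toNat % 2 ^ 64 : Nat) : Int) = (a.toNat : Int) % (2 ^ 64 : Nat) := by
    exact_mod_cast Int.natCast_emod _ _
  rw [h2, Int.toNat_of_nonneg h]
  norm_num

theorem pv_mask_nonneg (a : Int) : 0 ≤ PySem.Int.band a 0xFFFFFFFFFFFFFFFF := by
  rw [PySem.Int.band_comm]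
  exact PySem.Int.band_nonneg_of_nonneg_left a (by norm_num)

-- one iteration of A's loop body, expressed via the composed finalizer
theorem pv_step (x : Int) (acc : List Int) (h : Int) :
    pvLoopA (x, acc) h
    = (PySem.Int.band (x + 0x9E3779B97F4A7C15) 0xFFFFFFFFFFFFFFFF,
       acc ++ [pvMix (PySem.Int.band (x + 0x9E3779B97F4A7C15) 0xFFFFFFFFFFFFFFFF)]) := rfl

-- advancing the masked counter one step
theorem pv_next (base k : Int) :
    PySem.Int.band ((base + k * 0x9E3779B97F4A7C15) % 18446744073709551616 + 0x9E3779B97F4A7C15) 0xFFFFFFFFFFFFFFFF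
    = (base + (k + 1) * 0x9E3779B97F4A7C15) % 18446744073709551616 := by
  rw [pv_mask_emod _ (by
    have := Int.emod_nonneg (base + k * 0x9E3779B97F4A7C15) (by norm_num : (18446744073709551616:Int) ≠ 0)
    omega)]
  rw [Int.emod_add_emod]
  ring_nf

-- the loop invariant: starting the fold at counter value (base + k*G) mod 2^64,
-- the fold over any list of length n appends exactly the closed-form words k+1 … k+n
theorem pv_fold_inv (base : Int) (l : List Int) :
    ∀ (k : Int) (acc : List Int),
      l.foldl pvLoopA ((base + k * 0x9E3779B97F4A7C15) % 18446744073709551616, acc)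
      = ((base + (k + l.length) * 0x9E3779B97F4A7C15) % 18446744073709551616,
         acc ++ (List.range l.length).map
           (fun (i : Nat) => pvMix ((base + (k + (i : Int) + 1) * 0x9E3779B97F4A7C15) % 18446744073709551616))) := by
  induction l with
  | nil => intro k acc; simp
  | cons h t ih =>
    intro k acc
    rw [List.foldl_cons, pv_step, pv_next, ih (k + 1)]
    simp only [List.length_cons, List.range_succ_eq_map, List.map_cons, List.map_map,
      List.singleton_append, List.append_assoc]
    refine congrArg₂ Prod.mk ?_ ?_
    · push_cast; ring_nf
    · congr 1
      refine congrArg₂ List.cons ?_ ?_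
      · congr 1; push_cast; ring_nf
      · apply List.map_congr_left
        intro i _
        simp only [Function.comp]
        congr 1
        push_cast; ring_nf

-- both ports produce the same closed-form word list
theorem pv_ports_eq (seed stream_index words : Int) :
    splitmix64_words seed stream_index words = splitmix64_words_alt seed stream_index words := by
  rw [pv_alt_fused]
  unfold splitmix64_words
  set base := PySem.Int.band (PySem.Int.bxor seed ((stream_index + 1) * 0x9E3779B97F4A7C15)) 0xFFFFFFFFFFFFFFFF with hbase
  have hb : 0 ≤ base := pv_mask_nonneg _
  change ((PySem.List.pyRange 0 words 1).foldl pvLoopA (base, [])).2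
    = (PySem.List.pyRange 0 words 1).map (fun i => pvMix (PySem.Int.band (base + (i + 1) * 0x9E3779B97F4A7C15) 0xFFFFFFFFFFFFFFFF))
  by_cases hw : words ≤ 0
  · rw [PySem.List.pyRange_one_eq_nil (by omega)]
    simp
  · rw [PySem.List.pyRange_one_cons (by omega : (0:Int) < words)]
    rw [List.foldl_cons, pv_step]
    have hx1 : PySem.Int.band (base + 0x9E3779B97F4A7C15) 0xFFFFFFFFFFFFFFFF
        = (base + 1 * 0x9E3779B97F4A7C15) % 18446744073709551616 := by
      rw [pv_mask_emod _ (by omega)]; ring_nf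
    rw [hx1, pv_fold_inv]
    simp only [List.nil_append]
    rw [List.map_cons]
    have hmapB : ∀ (i : Int), 0 ≤ i →
        pvMix (PySem.Int.band (base + (i + 1) * 0x9E3779B97F4A7C15) 0xFFFFFFFFFFFFFFFF)
        = pvMix ((base + (i + 1) * 0x9E3779B97F4A7C15) % 18446744073709551616) := by
      intro i hi
      rw [pv_mask_emod _ (by nlinarith)]
    rw [PySem.List.pyRange_one (0 + 1) words, List.map_map]
    simp only [List.length_map, List.length_range, List.singleton_append]
    congr 1
    · rw [hmapB 0 le_rfl]; norm_num
    · apply List.map_congr_left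
      intro i _
      simp only [Function.comp]
      rw [hmapB _ (by positivity)]
      norm_num

-- ===== VERDICT (by name: the statement is the Claim_ definition above) =====
theorem splitmix64_words_spec : Claim_equal_splitmix64_words := by
  intro seed stream_index words _
  unfold Spec_splitmix64_words
  exact pv_ports_eq seed stream_index words
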